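-- pv_equiv track=rewrite | github.com/MemorySlice/MemDiver | architect/volatility3_exporter.py | _longest_static_run
-- ===== SOURCE A (Python) =====
-- def _longest_static_run(wildcard_pattern: str) -> tuple[str, int]:
--     """Extract longest contiguous run of non-wildcard hex bytes.
--
--     Returns ``(hex_string, byte_offset)`` where *byte_offset* is the
--     position of the first byte of the run inside the full pattern.
--     """
--     tokens = wildcard_pattern.split()
--     best: list[str] = []
--     best_start = 0
--     current: list[str] = []
--     current_start = 0
--     for i, token in enumerate(tokens):
--         if "?" in token:
--             if len(current) > len(best):
--                 best = current
--                 best_start = current_start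
--             current = []
--             current_start = i + 1
--         else:
--             if not current:
--                 current_start = i
--             current.append(token)
--     if len(current) > len(best):
--         best = current
--         best_start = current_start
--     return "".join(best).lower(), best_start
-- ===== SOURCE B (Python) =====
-- def _longest_static_run(wildcard_pattern: str) -> tuple[str, int]:
--     """Group the tokens into maximal non-wildcard runs first, then select
--     the longest run with max (earliest run wins ties)."""
--     tokens = wildcard_pattern.split()
--     groups = []  # (start_token_index, run_tokens) for each maximal non-wildcard run
--     i = 0
--     rest = tokens
--     while rest:
--         tok = rest[0]
--         if "?" in tok:
--             rest = rest[1:]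
--             i += 1
--         else:
--             run = [tok]
--             rest = rest[1:]
--             while rest and "?" not in rest[0]:
--                 run.append(rest[0])
--                 rest = rest[1:]
--             groups.append((i, run))
--             i += len(run)
--     start, run = max(groups, key=lambda g: len(g[1]), default=(0, []))
--     return "".join(run).lower(), start
-- ===== Notes on version B (the rewrite author's own statement) =====
-- stated objective: alternative
-- what changed: B first builds the list of maximal non-wildcard runs with their start indices (group-then-select) and picks the longest via max with a key, replacing A's inline best-so-far accumulator interleaved with the token scan.
import Mathlib
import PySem

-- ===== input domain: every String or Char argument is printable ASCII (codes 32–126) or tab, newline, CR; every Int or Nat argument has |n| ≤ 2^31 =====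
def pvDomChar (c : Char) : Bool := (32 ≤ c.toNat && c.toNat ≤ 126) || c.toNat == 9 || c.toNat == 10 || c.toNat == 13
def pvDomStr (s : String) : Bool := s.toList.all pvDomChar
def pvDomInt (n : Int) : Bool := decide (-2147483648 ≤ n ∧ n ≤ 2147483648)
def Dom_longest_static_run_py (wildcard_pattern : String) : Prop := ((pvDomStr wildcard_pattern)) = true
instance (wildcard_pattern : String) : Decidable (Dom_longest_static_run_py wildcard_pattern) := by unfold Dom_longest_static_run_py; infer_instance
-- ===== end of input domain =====

-- B groups the tokens into maximal non-wildcard runs first and then selects the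
-- longest run with max-by-key; same result as A's inline best-so-far scan.

-- ===== PORT A =====
-- A's for-loop over enumerate(tokens): state (best, best_start, current, current_start);
-- the returned pair is (best_start, best).
def pvAloop (toks : List String) (i : Int) (best : List String) (bs : Int)
    (cur : List String) (cs : Int) : Int × List String :=
  match toks with
  | [] => if best.length < cur.length then (cs, cur) else (bs, best)
  | t :: ts =>
    if PySem.Str.isIn "?" t then
      if best.length < cur.length then pvAloop ts (i + 1) cur cs [] (i + 1)
      else pvAloop ts (i + 1) best bs [] (i + 1)
    else
      pvAloop ts (i + 1) best bs (cur ++ [t]) (if cur.isEmpty then i else cs)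

def longest_static_run_py (wildcard_pattern : String) : String × Int :=
  let tokens := PySem.Str.split₀ wildcard_pattern
  let r := pvAloop tokens 0 [] 0 [] 0
  (PySem.Str.lower (PySem.Str.join "" r.2), r.1)

-- ===== PORT B =====
-- Source B's inner while: peel off the leading non-wildcard run, return (run, rest)
def pvRunSplit (ts : List String) : List String × List String :=
  match ts with
  | [] => ([], [])
  | t :: ts' =>
    if PySem.Str.isIn "?" t then ([], t :: ts')
    else
      let p := pvRunSplit ts'
      (t :: p.1, p.2)

theorem pvRunSplit_snd_le (ts : List String) : (pvRunSplit ts).2.length ≤ ts.length := by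
  induction ts with
  | nil => simp [pvRunSplit]
  | cons t ts' ih =>
    simp only [pvRunSplit]
    split
    · simp
    · simpa using Nat.le_succ_of_le ih

-- Source B's outer while: the list of (start_index, run) for each maximal non-wildcard run
def pvGroups (ts : List String) (i : Int) : List (Int × List String) :=
  match h : ts with
  | [] => []
  | t :: ts' =>
    if PySem.Str.isIn "?" t then pvGroups ts' (i + 1)
    else
      let p := pvRunSplit ts'
      (i, t :: p.1) :: pvGroups p.2 (i + 1 + p.1.length)
termination_by ts.length
decreasing_by
  · simp
  · simpa using Nat.lt_succ_of_le (pvRunSplit_snd_le ts')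

def longest_static_run_py_alt (wildcard_pattern : String) : String × Int :=
  let tokens := PySem.Str.split₀ wildcard_pattern
  let g := PySem.List.maxD (pvGroups tokens 0) (fun g => g.2.length) (0, [])
  (PySem.Str.lower (PySem.Str.join "" g.2), g.1)

-- ===== PRECONDITION & SPEC =====
def Spec_longest_static_run_py (wildcard_pattern : String) (out : String × Int) : Prop := out = longest_static_run_py_alt wildcard_pattern
instance (wildcard_pattern : String) (out : String × Int) : Decidable (Spec_longest_static_run_py wildcard_pattern out) := by unfold Spec_longest_static_run_py; infer_instance

-- ===== CLAIM (what is proved, stated in full; the proofs are below) =====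
def Claim_equal_longest_static_run_py : Prop := ∀ (wildcard_pattern : String), Dom_longest_static_run_py wildcard_pattern → Spec_longest_static_run_py wildcard_pattern (longest_static_run_py wildcard_pattern)

-- ===== LEMMAS AND PROOFS =====

-- A's "replace best if current is longer" step, on (start, run) pairs
def pvAstep (acc g : Int × List String) : Int × List String :=
  if acc.2.length < g.2.length then g else acc

-- A's loop equals a fold of pvAstep over the group list (with the pending run folded in)
theorem pvMainAux (n : Nat) : ∀ (toks : List String), toks.length ≤ n →
    (∀ (i : Int) best bs (cs : Int),
      pvAloop toks i best bs [] cs = (pvGroups toks i).foldl pvAstep (bs, best)) ∧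
    (∀ (i : Int) best bs cur (cs : Int), cur ≠ [] →
      pvAloop toks i best bs cur cs =
        (pvGroups (pvRunSplit toks).2 (i + (pvRunSplit toks).1.length)).foldl pvAstep
          (pvAstep (bs, best) (cs, cur ++ (pvRunSplit toks).1))) := by
  induction n with
  | zero =>
    intro toks h
    have : toks = [] := List.length_eq_zero_iff.mp (Nat.le_zero.mp h)
    subst this
    constructor
    · intro i best bs cs
      simp [pvAloop, pvGroups]
    · intro i best bs cur cs hcur
      simp [pvAloop, pvRunSplit, pvGroups, pvAstep]
  | succ n ih =>
    intro toks h
    cases toks with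
    | nil =>
      constructor
      · intro i best bs cs
        simp [pvAloop, pvGroups]
      · intro i best bs cur cs hcur
        simp [pvAloop, pvRunSplit, pvGroups, pvAstep]
    | cons t ts =>
      have hts : ts.length ≤ n := by simpa using h
      constructor
      · intro i best bs cs
        by_cases hw : PySem.Str.isIn "?" t = true
        · rw [pvAloop, pvGroups, if_pos hw, if_pos hw]
          have hb : ¬ (best.length < ([] : List String).length) := by simp
          rw [if_neg hb]
          exact (ih ts hts).1 (i + 1) best bs (i + 1)
        · rw [pvAloop, pvGroups, if_neg hw, if_neg hw,
            if_pos (List.isEmpty_nil), List.nil_append,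
            (ih ts hts).2 (i + 1) best bs [t] i (by simp),
            List.foldl_cons]
          simp
      · intro i best bs cur cs hcur
        by_cases hw : PySem.Str.isIn "?" t = true
        · rw [pvAloop, pvRunSplit, if_pos hw, if_pos hw]
          rw [pvGroups, if_pos hw]
          simp only [List.append_nil]
          by_cases hlen : best.length < cur.length
          · rw [if_pos hlen, (ih ts hts).1 (i + 1) cur cs (i + 1)]
            simp [pvAstep, hlen]
          · rw [if_neg hlen, (ih ts hts).1 (i + 1) best bs (i + 1)]
            simp [pvAstep, hlen]
        · have hne : ¬ (cur.isEmpty = true) := by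
            simpa [List.isEmpty_iff] using hcur
          rw [pvAloop, pvRunSplit, if_neg hw, if_neg hw, if_neg hne,
            (ih ts hts).2 (i + 1) best bs (cur ++ [t]) cs (by simp)]
          simp only [List.append_assoc, List.singleton_append, List.length_cons]
          have harith : i + 1 + ((pvRunSplit ts).1.length : Int) =
              i + (((pvRunSplit ts).1.length : Nat) + 1 : Nat) := by
            push_cast; ring
          rw [harith]

-- the fold of pvAstep from the zero group equals maxD when every run is nonempty
theorem pvMax?_cons_cons (m g : Int × List String) (gs : List (Int × List String)) :
    PySem.List.max? (m :: g :: gs) (fun g => g.2.length) =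
      PySem.List.max? (pvAstep m g :: gs) (fun g => g.2.length) := by
  by_cases hlt : m.2.length < g.2.length <;>
    simp [PySem.List.max?, pvAstep, hlt]

theorem pvMax?_cons (gs : List (Int × List String)) :
    ∀ m, PySem.List.max? (m :: gs) (fun g => g.2.length) =
      some (gs.foldl pvAstep m) := by
  induction gs with
  | nil => intro m; simp [PySem.List.max?]
  | cons g gs ihg =>
    intro m
    rw [pvMax?_cons_cons, ihg, List.foldl_cons]

theorem pvFoldl_eq_maxD (groups : List (Int × List String))
    (h : ∀ g ∈ groups, g.2 ≠ []) :
    groups.foldl pvAstep ((0 : Int), ([] : List String)) =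
      PySem.List.maxD groups (fun g => g.2.length) (0, []) := by
  cases groups with
  | nil => simp [PySem.List.maxD, PySem.List.max?]
  | cons g gs =>
    have hg : g.2 ≠ [] := h g (by simp)
    have h0 : pvAstep ((0 : Int), ([] : List String)) g = g := by
      simp [pvAstep, List.length_pos_iff.mpr hg]
    rw [PySem.List.maxD, pvMax?_cons gs g, List.foldl_cons, h0]
    rfl

theorem pvGroupsNonemptyAux (n : Nat) : ∀ (ts : List String), ts.length ≤ n →
    ∀ (i : Int), ∀ g ∈ pvGroups ts i, g.2 ≠ [] := by
  induction n with
  | zero =>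
    intro ts h
    have : ts = [] := List.length_eq_zero_iff.mp (Nat.le_zero.mp h)
    subst this
    intro i g hg
    simp [pvGroups] at hg
  | succ n ih =>
    intro ts h
    cases ts with
    | nil => intro i g hg; simp [pvGroups] at hg
    | cons t ts' =>
      have hts : ts'.length ≤ n := by simpa using h
      intro i g hg
      rw [pvGroups] at hg
      by_cases hw : PySem.Str.isIn "?" t = true
      · rw [if_pos hw] at hg
        exact ih ts' hts (i + 1) g hg
      · rw [if_neg hw] at hg
        rcases List.mem_cons.mp hg with hg | hg
        · subst hg; simp
        · exact ih (pvRunSplit ts').2 (le_trans (pvRunSplit_snd_le ts') hts) _ g hg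

-- ===== VERDICT (by name: the statement is the Claim_ definition above) =====
theorem longest_static_run_py_spec : Claim_equal_longest_static_run_py := by
  intro w _
  unfold Spec_longest_static_run_py longest_static_run_py longest_static_run_py_alt
  dsimp only
  rw [(pvMainAux (PySem.Str.split₀ w).length (PySem.Str.split₀ w) le_rfl).1 0 [] 0 0,
    pvFoldl_eq_maxD _ (pvGroupsNonemptyAux _ _ le_rfl 0)]
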